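-- pv_equiv track=rewrite | github.com/vllm-project/vllm | examples/minicpmv_example.py | get_grid_placeholder
-- ===== SOURCE A (Python) =====
-- def get_grid_placeholder(grid, query_num):
--     image_placeholder = query_num + 2
--
--     cols = grid[0]
--     rows = grid[1]
--     slices = 0
--     for i in range(rows):
--         lines = 0
--         for j in range(cols):
--             lines += image_placeholder
--         if i < rows - 1:
--             slices += lines + 1
--         else:
--             slices += lines
--     slice_placeholder = 2 + slices
--     return slice_placeholder
-- ===== SOURCE B (Python) =====
-- def get_grid_placeholder(grid, query_num):
--     image_placeholder = query_num + 2
--     cols = grid[0]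
--     rows = grid[1]
--     if rows <= 0:
--         return 2
--     return rows * max(cols, 0) * image_placeholder + rows + 1
-- ===== Notes on version B (the rewrite author's own statement) =====
-- stated objective: faster
-- what changed: Replaced the nested rows*cols accumulation loop with a closed-form formula rows*max(cols,0)*(query_num+2) + rows + 1 (and 2 for nonpositive rows).
import Mathlib
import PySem

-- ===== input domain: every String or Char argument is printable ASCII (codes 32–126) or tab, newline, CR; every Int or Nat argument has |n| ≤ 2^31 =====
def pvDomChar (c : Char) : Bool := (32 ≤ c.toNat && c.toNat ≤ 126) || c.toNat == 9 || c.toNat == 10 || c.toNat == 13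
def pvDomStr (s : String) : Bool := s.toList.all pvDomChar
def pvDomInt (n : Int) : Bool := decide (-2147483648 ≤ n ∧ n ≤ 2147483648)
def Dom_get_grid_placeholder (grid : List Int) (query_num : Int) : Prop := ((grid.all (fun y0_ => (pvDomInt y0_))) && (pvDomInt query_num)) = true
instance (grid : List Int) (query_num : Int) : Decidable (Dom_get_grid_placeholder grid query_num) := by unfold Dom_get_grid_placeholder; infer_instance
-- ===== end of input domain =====

-- B replaces A's nested rows×cols accumulation loop with a closed-form O(1) formula (faster, asymptotic).


-- ===== PORT A =====
def get_grid_placeholder (grid : List Int) (query_num : Int) : Int :=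
  let image_placeholder := query_num + 2
  let cols := PySem.List.pyGetD grid 0 0
  let rows := PySem.List.pyGetD grid 1 0
  let slices := (PySem.List.pyRange 0 rows).foldl (fun slices i =>
      let lines := (PySem.List.pyRange 0 cols).foldl
          (fun lines _ => lines + image_placeholder) 0
      if i < rows - 1 then slices + lines + 1 else slices + lines) 0
  2 + slices

-- ===== PORT B =====
def get_grid_placeholder_alt (grid : List Int) (query_num : Int) : Int :=
  let image_placeholder := query_num + 2
  let cols := PySem.List.pyGetD grid 0 0
  let rows := PySem.List.pyGetD grid 1 0
  if rows ≤ 0 then 2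
  else rows * max cols 0 * image_placeholder + rows + 1

-- ===== PRECONDITION & SPEC =====
-- Pre_: A indexes grid[0] and grid[1], raising IndexError on lists of length < 2.
def Pre_get_grid_placeholder (grid : List Int) (query_num : Int) : Prop := 2 ≤ grid.length
instance (grid : List Int) (query_num : Int) : Decidable (Pre_get_grid_placeholder grid query_num) := by unfold Pre_get_grid_placeholder; infer_instance
def pvWitness_get_grid_placeholder : List Int × Int := ([3, 2], 5)
def Spec_get_grid_placeholder (grid : List Int) (query_num : Int) (out : Int) : Prop := out = get_grid_placeholder_alt grid query_num
instance (grid : List Int) (query_num : Int) (out : Int) : Decidable (Spec_get_grid_placeholder grid query_num out) := by unfold Spec_get_grid_placeholder; infer_instance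

-- ===== CLAIM (what is proved, stated in full; the proofs are below) =====
def Claim_equal_get_grid_placeholder : Prop := ∀ (grid : List Int) (query_num : Int), Dom_get_grid_placeholder grid query_num → Pre_get_grid_placeholder grid query_num → Spec_get_grid_placeholder grid query_num (get_grid_placeholder grid query_num)

-- ===== LEMMAS AND PROOFS =====

-- The inner loop of A adds image_placeholder once per column: it totals max cols 0 * ip.
theorem pv_inner_eq (cols ip : Int) :
    (PySem.List.pyRange 0 cols).foldl (fun l _ => l + ip) 0 = max cols 0 * ip := by
  rw [PySem.List.foldl_add (g := fun _ => ip)]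
  have hlen : ((PySem.List.pyRange 0 cols).length : Int) = max cols 0 := by simp [pysem]
  rw [List.map_const', List.sum_replicate, nsmul_eq_mul, zero_add, hlen]

-- The outer loop's per-iteration contribution, summed over range(r).
theorem pv_outer_sum (r L : Int) :
    ((PySem.List.pyRange 0 r).map (fun i => if i < r - 1 then L + 1 else L)).sum
      = if r ≤ 0 then 0 else r * L + (r - 1) := by
  have hlen : ∀ b : Int, ((PySem.List.pyRange 0 b).length : Int) = max b 0 := by
    intro b; simp [pysem]
  by_cases hr : r ≤ 0
  · have h0 : (PySem.List.pyRange 0 r).length = 0 := by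
      have := hlen r; omega
    rw [List.eq_nil_of_length_eq_zero h0]
    simp [hr]
  · have hr1 : r - 1 + 1 = r := by ring
    have hsplit : PySem.List.pyRange 0 r = PySem.List.pyRange 0 (r - 1) ++ [r - 1] := by
      have h := PySem.List.pyRange_one_succ_right (a := 0) (b := r - 1) (by omega)
      rwa [hr1] at h
    rw [hsplit, List.map_append, List.sum_append]
    have hcongr : (PySem.List.pyRange 0 (r - 1)).map (fun i => if i < r - 1 then L + 1 else L)
        = (PySem.List.pyRange 0 (r - 1)).map (fun _ => L + 1) := by
      apply List.map_congr_left
      intro x hx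
      have := (PySem.List.mem_pyRange_one).1 hx
      simp [this.2]
    rw [hcongr, List.map_const', List.sum_replicate, nsmul_eq_mul]
    simp only [List.map_cons, List.map_nil, List.sum_cons, List.sum_nil]
    have h1 : ¬ (r - 1 < r - 1) := by omega
    have h2 : ((PySem.List.pyRange 0 (r - 1)).length : Int) = r - 1 := by
      have := hlen (r - 1); omega
    rw [if_neg h1, if_neg hr, h2]
    ring

-- ===== VERDICT (by name: the statement is the Claim_ definition above) =====
theorem get_grid_placeholder_spec : Claim_equal_get_grid_placeholder := by
  intro grid query_num _ _
  unfold Spec_get_grid_placeholder get_grid_placeholder get_grid_placeholder_alt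
  set ip := query_num + 2 with hip
  set cols := PySem.List.pyGetD grid 0 0 with hcols
  set rows := PySem.List.pyGetD grid 1 0 with hrows
  simp only [pv_inner_eq]
  set L := max cols 0 * ip with hL
  have hcg : (PySem.List.pyRange 0 rows).foldl
      (fun slices i => if i < rows - 1 then slices + L + 1 else slices + L) 0
      = (PySem.List.pyRange 0 rows).foldl
      (fun slices i => slices + (if i < rows - 1 then L + 1 else L)) 0 := by
    apply PySem.List.foldl_congr_mem
    intro acc x _
    split_ifs <;> ring
  rw [hcg, PySem.List.foldl_add (g := fun i => if i < rows - 1 then L + 1 else L),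
    pv_outer_sum rows L]
  by_cases h : rows ≤ 0
  · rw [if_pos h, if_pos h]; norm_num
  · rw [if_neg h, if_neg h]; ring
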